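-- pv_equiv track=rewrite | github.com/alok1974/pychess | src/pychess/core/pgn.py | _pair_moves
-- ===== SOURCE A (Python) =====
-- def _pair_moves(moves):
--     pairs = list(zip(moves[::2], moves[1::2]))
--     if len(moves) % 2 != 0:
--         pairs.append((moves[-1], ''))
--
--     return [
--         (index + 1, x[0], x[1])
--         for index, x in enumerate(pairs)
--     ]
-- ===== SOURCE B (Python) =====
-- def _pair_moves(moves):
--     out = []
--     it = iter(moves)
--     for num, white in enumerate(it, 1):
--         out.append((num, white, next(it, '')))
--     return out
-- ===== Notes on version B (the rewrite author's own statement) =====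
-- stated objective: simpler
-- what changed: Replaced the slice-zip-append-enumerate pipeline (three intermediate lists) with one pass over an iterator that consumes two moves at a time, handling the odd tail inline via next(it, '').
import Mathlib
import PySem

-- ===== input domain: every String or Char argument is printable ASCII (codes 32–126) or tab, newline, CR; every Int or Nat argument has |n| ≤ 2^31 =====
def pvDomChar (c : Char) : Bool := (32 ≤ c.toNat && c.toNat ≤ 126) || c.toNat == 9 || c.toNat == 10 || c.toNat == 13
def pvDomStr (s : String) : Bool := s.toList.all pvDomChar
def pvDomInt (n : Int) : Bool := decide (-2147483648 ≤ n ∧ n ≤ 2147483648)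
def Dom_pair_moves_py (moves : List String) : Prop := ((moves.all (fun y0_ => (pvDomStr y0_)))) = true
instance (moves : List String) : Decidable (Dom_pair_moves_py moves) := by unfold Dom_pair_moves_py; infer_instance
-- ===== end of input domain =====

-- B replaces A's slice/zip/append/enumerate pipeline by a single pass consuming two moves at a time (simpler; return value only).

-- ===== PORT A =====
-- pairs = list(zip(moves[::2], moves[1::2])); append (moves[-1],'') if odd length
-- moves is nonempty in the odd branch, so pyGet? moves (-1) is always some; getD "" is exact.
def pvPairsA (moves : List String) : List (String × String) :=
  let pairs := List.zip ((PySem.List.slice? moves none none 2).getD [])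
                        ((PySem.List.slice? moves (some 1) none 2).getD [])
  if (moves.length : Int) % 2 ≠ 0 then
    pairs ++ [((PySem.List.pyGet? moves (-1)).getD "", "")]
  else pairs

def pair_moves_py (moves : List String) : List (Int × String × String) :=
  (PySem.List.enumerate (pvPairsA moves) 0).map (fun p => (p.1 + 1, p.2.1, p.2.2))

-- ===== PORT B =====
-- the for-loop over the iterator, consuming two elements per step; num counts from 1
def pvPairLoopB (num : Int) : List String → List (Int × String × String)
  | [] => []
  | [w] => [(num, w, "")]
  | w :: b :: rest => (num, w, b) :: pvPairLoopB (num + 1) rest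

def pair_moves_py_alt (moves : List String) : List (Int × String × String) :=
  pvPairLoopB 1 moves

-- ===== PRECONDITION & SPEC =====
def Spec_pair_moves_py (moves : List String) (out : List (Int × String × String)) : Prop := out = pair_moves_py_alt moves
instance (moves : List String) (out : List (Int × String × String)) : Decidable (Spec_pair_moves_py moves out) := by unfold Spec_pair_moves_py; infer_instance

-- ===== CLAIM (what is proved, stated in full; the proofs are below) =====
def Claim_equal_pair_moves_py : Prop := ∀ (moves : List String), Dom_pair_moves_py moves → Spec_pair_moves_py moves (pair_moves_py moves)

-- ===== LEMMAS AND PROOFS =====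

lemma evens_nil : PySem.List.slice? ([] : List String) none none 2 = some [] := by
  simp [PySem.List.slice?, PySem.List.sliceIndices]

lemma evens_one (x : String) : PySem.List.slice? [x] none none 2 = some [x] := by
  simp [PySem.List.slice?, PySem.List.sliceIndices]

lemma evens_cons_cons (x y : String) (rest : List String) :
    PySem.List.slice? (x :: y :: rest) none none 2 =
      some (x :: (PySem.List.slice? rest none none 2).getD []) := by
  simp only [PySem.List.slice?, PySem.List.sliceIndices]
  norm_num
  have h1 : (((rest.length:Int) + 1 + 1 + 2 - 1) / 2).toNat
      = (if 0 < rest.length then (((rest.length:Int) + 2 - 1) / 2).toNat else 0) + 1 := by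
    split <;> omega
  rw [if_pos (show (0:Int) ≤ (rest.length:Int) + 1 by positivity), h1,
      List.range_succ_eq_map, List.filterMap_cons, List.filterMap_map]
  simp
  apply List.filterMap_congr
  intro k _
  have : (2 * ((k:Int) + 1)).toNat = (2*(k:Int)).toNat + 1 + 1 := by omega
  rw [this]
  simp

lemma odds_nil : PySem.List.slice? ([] : List String) (some 1) none 2 = some [] := by
  simp [PySem.List.slice?, PySem.List.sliceIndices]

lemma odds_one (x : String) : PySem.List.slice? [x] (some 1) none 2 = some [] := by
  simp [PySem.List.slice?, PySem.List.sliceIndices]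

lemma odds_cons_cons (x y : String) (rest : List String) :
    PySem.List.slice? (x :: y :: rest) (some 1) none 2 =
      some (y :: (PySem.List.slice? rest (some 1) none 2).getD []) := by
  simp only [PySem.List.slice?, PySem.List.sliceIndices]
  norm_num
  have h1 : (((rest.length:Int) + 1 + 1 - min 1 ((rest.length:Int) + 1 + 1) + 2 - 1) / 2).toNat
      = (if 1 < rest.length then (((rest.length:Int) - min 1 (rest.length:Int) + 2 - 1) / 2).toNat else 0) + 1 := by
    split <;> omega
  rw [h1, List.range_succ_eq_map, List.filterMap_cons, List.filterMap_map]
  have hm : (min 1 ((rest.length:Int) + 1 + 1) + 2 * (0:Int)).toNat = 1 := by omega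
  simp only [Nat.cast_zero, hm]
  simp only [List.getElem?_cons_succ, List.getElem?_cons_zero]
  congr 1
  apply List.filterMap_congr
  intro k hk
  have hL : 1 < rest.length := by
    by_contra hc
    simp [if_neg hc] at hk
  simp only [Function.comp_apply, Nat.succ_eq_add_one, Nat.cast_add, Nat.cast_one]
  have : (min 1 ((rest.length:Int) + 1 + 1) + 2 * ((k:Int) + 1)).toNat
      = (min 1 (rest.length:Int) + 2 * (k:Int)).toNat + 1 + 1 := by omega
  rw [this]
  simp

lemma pairsA_nil : pvPairsA [] = [] := by
  simp [pvPairsA, evens_nil, odds_nil]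

lemma pairsA_one (x : String) : pvPairsA [x] = [(x, "")] := by
  simp [pvPairsA, evens_one, odds_one, PySem.List.pyGet?, PySem.List.pyIdx?]

lemma pyGet_last_cons_cons (x y : String) (rest : List String) (h : rest ≠ []) :
    PySem.List.pyGet? (x :: y :: rest) (-1) = PySem.List.pyGet? rest (-1) := by
  simp only [PySem.List.pyGet?, PySem.List.pyIdx?]
  have hL : 0 < rest.length := List.length_pos_iff.mpr h
  norm_num
  rw [if_pos (by omega : 1 ≤ rest.length)]
  simp only [Option.bind]
  rw [List.getElem?_eq_getElem (by omega : rest.length - 1 < rest.length)]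
  simp [List.getElem_cons]
  rw [dif_neg h]

lemma pairsA_cons_cons (x y : String) (rest : List String) :
    pvPairsA (x :: y :: rest) = (x, y) :: pvPairsA rest := by
  simp only [pvPairsA, evens_cons_cons, odds_cons_cons, Option.getD_some, List.zip_cons_cons]
  have hpar : ((x :: y :: rest).length : Int) % 2 = ((rest.length : Int)) % 2 := by
    simp; omega
  by_cases hodd : ((rest.length : Int)) % 2 ≠ 0
  · have hne : rest ≠ [] := by
      intro h; subst h; simp at hodd
    rw [if_pos (by rw [hpar]; exact hodd), if_pos hodd, pyGet_last_cons_cons x y rest hne]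
    simp
  · rw [if_neg (by rw [hpar]; exact hodd), if_neg hodd]

lemma main_loop (L : Nat) : ∀ (moves : List String), moves.length ≤ L → ∀ (n : Int),
    (PySem.List.enumerate (pvPairsA moves) n).map (fun p => (p.1 + 1, p.2.1, p.2.2))
      = pvPairLoopB (n + 1) moves := by
  induction L with
  | zero =>
    intro moves h n
    have : moves = [] := List.eq_nil_of_length_eq_zero (Nat.le_zero.mp h)
    subst this
    simp [pairsA_nil, PySem.List.enumerate_nil, pvPairLoopB]
  | succ L ih =>
    intro moves h n
    match moves with
    | [] => simp [pairsA_nil, PySem.List.enumerate_nil, pvPairLoopB]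
    | [x] => simp [pairsA_one, PySem.List.enumerate_cons, PySem.List.enumerate_nil, pvPairLoopB]
    | x :: y :: rest =>
      have hlen : rest.length ≤ L := by simp at h; omega
      rw [pairsA_cons_cons, PySem.List.enumerate_cons]
      simp only [List.map_cons, pvPairLoopB]
      congr 1
      exact ih rest hlen (n + 1)

-- ===== VERDICT (by name: the statement is the Claim_ definition above) =====
theorem pair_moves_py_spec : Claim_equal_pair_moves_py := by
  intro moves _
  unfold Spec_pair_moves_py pair_moves_py pair_moves_py_alt
  have := main_loop moves.length moves (le_refl _) 0
  simpa using this
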